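-- pv_equiv track=rewrite | github.com/eywu/engram | src/engram/agent.py | _claude_simple_hash
-- ===== SOURCE A (Python) =====
-- def _claude_simple_hash(value: str) -> str:
--     hash_value = 0
--     for char in value:
--         hash_value = ((hash_value << 5) - hash_value + ord(char)) & 0xFFFFFFFF
--         if hash_value >= 0x80000000:
--             hash_value -= 0x100000000
--     hash_value = abs(hash_value)
--     if hash_value == 0:
--         return "0"
--
--     digits = "0123456789abcdefghijklmnopqrstuvwxyz"
--     encoded = []
--     while hash_value:
--         encoded.append(digits[hash_value % 36])
--         hash_value //= 36
--     return "".join(reversed(encoded))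
-- ===== SOURCE B (Python) =====
-- def _claude_simple_hash(value: str) -> str:
--     # polynomial accumulation in reverse instead of Horner rolling; sign fix once at the end
--     acc = 0
--     power = 1
--     for char in reversed(value):
--         acc = (acc + ord(char) * power) & 0xFFFFFFFF
--         power = (power * 31) & 0xFFFFFFFF
--     if acc >= 0x80000000:
--         acc -= 0x100000000
--     acc = abs(acc)
--     if acc == 0:
--         return "0"
--     digits = "0123456789abcdefghijklmnopqrstuvwxyz"
--     encoded = []
--     while acc:
--         encoded.append(digits[acc % 36])
--         acc //= 36
--     return "".join(reversed(encoded))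
-- ===== Notes on version B (the rewrite author's own statement) =====
-- stated objective: alternative
-- what changed: B computes the 32-bit hash as an explicit polynomial over the reversed string (acc += ord(c)*power, power *= 31, both mod 2^32) with a single signed normalization after the loop, instead of A's Horner rolling hash with per-step signed conversion; the base-36 expansion is unchanged.
import Mathlib
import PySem

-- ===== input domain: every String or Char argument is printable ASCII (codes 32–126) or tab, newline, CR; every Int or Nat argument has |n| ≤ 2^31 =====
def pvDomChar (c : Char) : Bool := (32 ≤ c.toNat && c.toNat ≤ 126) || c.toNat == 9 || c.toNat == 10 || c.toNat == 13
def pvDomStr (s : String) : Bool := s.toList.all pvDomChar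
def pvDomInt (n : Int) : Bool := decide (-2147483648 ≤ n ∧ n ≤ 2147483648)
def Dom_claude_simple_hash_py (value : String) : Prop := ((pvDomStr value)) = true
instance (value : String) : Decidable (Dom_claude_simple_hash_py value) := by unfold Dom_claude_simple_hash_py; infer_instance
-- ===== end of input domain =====

-- B computes the 32-bit hash as an explicit polynomial over the reversed string with one
-- signed normalization after the loop, instead of A's Horner rolling with per-step
-- signed conversion (alternative decomposition, same cost).


-- base-36 digit alphabet (shared: the base-36 expansion code is identical in A and B)
def pvDigits : List Char := "0123456789abcdefghijklmnopqrstuvwxyz".toList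

-- `while hash_value: encoded.append(digits[hash_value % 36]); hash_value //= 36`
-- produces the least-significant digit first; exact for nonnegative hash_value
-- (digits[h % 36] is in range since h % 36 < 36, so List.getD is exact here).
def pvEnc : Nat → List Char
  | 0 => []
  | (n + 1) => pvDigits.getD ((n + 1) % 36) ' ' :: pvEnc ((n + 1) / 36)
decreasing_by exact Nat.div_lt_of_lt_mul (by omega)

-- ===== PORT A =====
-- one iteration of A's loop: (h<<5) - h + ord(c), '& 0xFFFFFFFF' = emod 2^32
-- (exact also for negative h), then the per-step signed conversion
def pvStepA (h : Int) (c : Char) : Int :=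
  if 2147483648 ≤ (h * 32 - h + (c.toNat : Int)) % 4294967296
  then (h * 32 - h + (c.toNat : Int)) % 4294967296 - 4294967296
  else (h * 32 - h + (c.toNat : Int)) % 4294967296

def claude_simple_hash_py (value : String) : String :=
  let h := value.toList.foldl pvStepA 0
  let a := h.natAbs          -- abs(hash_value); the encode loop runs on this Nat
  if a = 0 then "0" else String.ofList (pvEnc a).reverse

-- ===== PORT B =====
-- one iteration of B's loop over the reversed string: acc += ord(c)*power, power *= 31, both mod 2^32
def pvStepB (st : Int × Int) (c : Char) : Int × Int :=
  ((st.1 + (c.toNat : Int) * st.2) % 4294967296, (st.2 * 31) % 4294967296)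

def claude_simple_hash_py_alt (value : String) : String :=
  let st := value.toList.reverse.foldl pvStepB (0, 1)
  let acc := st.1
  let h := if 2147483648 ≤ acc then acc - 4294967296 else acc
  let a := h.natAbs
  if a = 0 then "0" else String.ofList (pvEnc a).reverse

-- ===== PRECONDITION & SPEC =====
def Spec_claude_simple_hash_py (value : String) (out : String) : Prop := out = claude_simple_hash_py_alt value
instance (value : String) (out : String) : Decidable (Spec_claude_simple_hash_py value out) := by unfold Spec_claude_simple_hash_py; infer_instance

-- ===== CLAIM (what is proved, stated in full; the proofs are below) =====
def Claim_equal_claude_simple_hash_py : Prop := ∀ (value : String), Dom_claude_simple_hash_py value → Spec_claude_simple_hash_py value (claude_simple_hash_py value)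

-- ===== LEMMAS AND PROOFS =====

-- exact (un-reduced) Horner value of A's recurrence
def pvHorner (l : List Char) (h : Int) : Int :=
  l.foldl (fun h c => 31 * h + (c.toNat : Int)) h

-- exact polynomial value matching B's traversal (front char gets the highest power)
def pvPoly (l : List Char) : Int :=
  l.foldr (fun c v => (c.toNat : Int) + 31 * v) 0

theorem pvPoly_append_singleton (l : List Char) (c : Char) :
    pvPoly (l ++ [c]) = pvPoly l + (c.toNat : Int) * 31 ^ l.length := by
  induction l with
  | nil => simp [pvPoly]
  | cons x xs ih => simp [pvPoly] at ih ⊢; rw [ih]; ring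

theorem pvHorner_eq_poly_reverse (l : List Char) (h : Int) :
    pvHorner l h = h * 31 ^ l.length + pvPoly l.reverse := by
  induction l generalizing h with
  | nil => simp [pvHorner, pvPoly]
  | cons c t ih =>
    simp only [pvHorner, List.foldl_cons, List.reverse_cons] at *
    rw [ih (31 * h + (c.toNat : Int)), pvPoly_append_singleton]
    simp [List.length_reverse, pow_succ]
    ring

theorem pvStepA_mod (h : Int) (c : Char) :
    pvStepA h c % 4294967296 = (31 * h + (c.toNat : Int)) % 4294967296 := by
  unfold pvStepA
  split <;> simp [Int.sub_emod_right, Int.emod_emod_of_dvd] <;> ring_nf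

theorem pvStepA_range (h : Int) (c : Char) :
    -2147483648 ≤ pvStepA h c ∧ pvStepA h c < 2147483648 := by
  unfold pvStepA
  have h1 := Int.emod_nonneg (h * 32 - h + (c.toNat : Int)) (by norm_num : (4294967296 : Int) ≠ 0)
  have h2 := Int.emod_lt_of_pos (h * 32 - h + (c.toNat : Int)) (by norm_num : (0 : Int) < 4294967296)
  split <;> omega

theorem pvFoldA_range (l : List Char) (h : Int)
    (hh : -2147483648 ≤ h ∧ h < 2147483648) :
    -2147483648 ≤ l.foldl pvStepA h ∧ l.foldl pvStepA h < 2147483648 := by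
  induction l generalizing h with
  | nil => simpa using hh
  | cons c t ih => exact ih _ (pvStepA_range h c)

theorem pvFoldA_mod (l : List Char) (h h' : Int)
    (hm : h % 4294967296 = h' % 4294967296) :
    l.foldl pvStepA h % 4294967296 = pvHorner l h' % 4294967296 := by
  induction l generalizing h h' with
  | nil => simpa [pvHorner] using hm
  | cons c t ih =>
    simp only [List.foldl_cons, pvHorner] at *
    apply ih
    rw [pvStepA_mod]
    have : (31 * h + (c.toNat : Int)) % 4294967296
         = (31 * h' + (c.toNat : Int)) % 4294967296 := by
      conv_lhs => rw [Int.add_emod, Int.mul_emod, hm, ← Int.mul_emod, ← Int.add_emod]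
    exact this

theorem pvFoldB_fst_mod (l : List Char) (a p a' p' : Int)
    (ha : a % 4294967296 = a' % 4294967296) (hp : p % 4294967296 = p' % 4294967296) :
    (l.foldl pvStepB (a, p)).1 % 4294967296 = (a' + p' * pvPoly l) % 4294967296 := by
  induction l generalizing a p a' p' with
  | nil => simpa [pvPoly] using ha
  | cons c t ih =>
    simp only [List.foldl_cons, pvStepB, pvPoly, List.foldr_cons]
    have ha2 : ((a + (c.toNat : Int) * p) % 4294967296) % 4294967296
        = (a' + (c.toNat : Int) * p') % 4294967296 := by
      rw [Int.emod_emod_of_dvd _ dvd_rfl]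
      conv_lhs => rw [Int.add_emod, Int.mul_emod, ha, hp, ← Int.mul_emod, ← Int.add_emod]
    have hp2 : ((p * 31) % 4294967296) % 4294967296 = (p' * 31) % 4294967296 := by
      rw [Int.emod_emod_of_dvd _ dvd_rfl]
      conv_lhs => rw [Int.mul_emod, hp, ← Int.mul_emod]
    have := ih ((a + (c.toNat : Int) * p) % 4294967296) ((p * 31) % 4294967296)
      (a' + (c.toNat : Int) * p') (p' * 31) ha2 hp2
    rw [this]
    have : a' + (c.toNat : Int) * p' + p' * 31 * (pvPoly t)
         = a' + p' * ((c.toNat : Int) + 31 * pvPoly t) := by ring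
    rw [this]
    rfl

theorem pvFoldB_fst_range (l : List Char) (a p : Int)
    (ha : 0 ≤ a ∧ a < 4294967296) :
    0 ≤ (l.foldl pvStepB (a, p)).1 ∧ (l.foldl pvStepB (a, p)).1 < 4294967296 := by
  induction l generalizing a p with
  | nil => simpa using ha
  | cons c t ih =>
    simp only [List.foldl_cons, pvStepB]
    exact ih _ _ ⟨Int.emod_nonneg _ (by norm_num),
                  Int.emod_lt_of_pos _ (by norm_num)⟩

theorem pvHash_eq (value : String) :
    value.toList.foldl pvStepA 0 =
      (if 2147483648 ≤ (value.toList.reverse.foldl pvStepB (0, 1)).1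
       then (value.toList.reverse.foldl pvStepB (0, 1)).1 - 4294967296
       else (value.toList.reverse.foldl pvStepB (0, 1)).1) := by
  set l := value.toList with hl
  set r := l.foldl pvStepA 0 with hr
  set s := (l.reverse.foldl pvStepB (0, 1)).1 with hs
  have hrR := pvFoldA_range l 0 (by norm_num)
  have hsR := pvFoldB_fst_range l.reverse 0 1 (by norm_num)
  have hrM : r % 4294967296 = pvHorner l 0 % 4294967296 := pvFoldA_mod l 0 0 rfl
  have hsM : s % 4294967296 = pvPoly l.reverse % 4294967296 := by
    have := pvFoldB_fst_mod l.reverse 0 1 0 1 rfl rfl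
    simpa only [zero_add, one_mul] using this
  have hHP : pvHorner l 0 = pvPoly l.reverse := by
    rw [pvHorner_eq_poly_reverse]; ring
  set b := (if 2147483648 ≤ s then s - 4294967296 else s) with hb
  have hbM : b % 4294967296 = s % 4294967296 := by
    rw [hb]; split <;> simp [Int.sub_emod_right]
  have hbR : -2147483648 ≤ b ∧ b < 2147483648 := by rw [hb]; split <;> omega
  have : r % 4294967296 = b % 4294967296 := by rw [hrM, hHP, ← hsM, hbM]
  show r = b
  omega

-- ===== VERDICT (by name: the statement is the Claim_ definition above) =====
theorem claude_simple_hash_py_spec : Claim_equal_claude_simple_hash_py := by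
  intro value _
  show claude_simple_hash_py value = claude_simple_hash_py_alt value
  simp only [claude_simple_hash_py, claude_simple_hash_py_alt]
  rw [pvHash_eq value]
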